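-- pv_equiv track=rewrite | github.com/annyaa/comp110-22s-workspace | exercises/ex08/data_utils.py | filter_analysis
-- ===== SOURCE A (Python) =====
-- def filter_analysis(table_input: list[dict[str, str]], column: str, response_to_tally: str) -> dict[str, int]:
--     """Split respondents into comp sci and non comp sci majors and further filter them by value."""
--     major_responses: list[str] = []
--     major_count: int = 0
--     non_major_count: int = 0
--     filter_majors: dict[str, int] = {}
--     for row in table_input:
--         item: str = row[column]
--         major_responses.append(item)
--     for response in major_responses:
--         if response == response_to_tally:
--             non_major_count += 1
--         else:
--             major_count += 1
--     filter_majors["non comp sci major"] = non_major_count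
--     filter_majors["comp sci major"] = major_count
--     return filter_majors
-- ===== SOURCE B (Python) =====
-- def filter_analysis(table_input: list[dict[str, str]], column: str, response_to_tally: str) -> dict[str, int]:
--     """Split respondents into comp sci and non comp sci majors and further filter them by value."""
--     freq: dict[str, int] = {}
--     for row in table_input:
--         value: str = row[column]
--         freq[value] = freq.get(value, 0) + 1
--     matches: int = freq.get(response_to_tally, 0)
--     return {"non comp sci major": matches, "comp sci major": len(table_input) - matches}
-- ===== Notes on version B (the rewrite author's own statement) =====
-- stated objective: alternative
-- what changed: Instead of A's two parallel match/non-match counters over an intermediate responses list, B builds a frequency dictionary of all distinct column values, reads the match count by a single lookup, and derives the other count by subtraction from the table length.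
import Mathlib
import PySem

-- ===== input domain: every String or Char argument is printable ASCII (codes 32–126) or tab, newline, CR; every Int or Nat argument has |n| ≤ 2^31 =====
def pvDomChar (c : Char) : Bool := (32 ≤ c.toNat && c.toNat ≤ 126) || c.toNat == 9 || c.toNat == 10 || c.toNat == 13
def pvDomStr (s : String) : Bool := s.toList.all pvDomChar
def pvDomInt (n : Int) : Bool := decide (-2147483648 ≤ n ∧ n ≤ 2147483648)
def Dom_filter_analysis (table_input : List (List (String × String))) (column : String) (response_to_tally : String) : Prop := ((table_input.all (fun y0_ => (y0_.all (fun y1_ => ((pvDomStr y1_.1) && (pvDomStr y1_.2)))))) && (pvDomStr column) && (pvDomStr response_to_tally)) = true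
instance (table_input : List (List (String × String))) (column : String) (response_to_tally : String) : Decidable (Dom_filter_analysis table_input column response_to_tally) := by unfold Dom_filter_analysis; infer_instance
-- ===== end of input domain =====

-- ===== PORT A =====
-- B replaces A's two parallel counters with a frequency dictionary over the
-- column values plus one lookup; the other count follows by subtraction (objective: alternative).
-- row[column]: first-match association-list lookup; Pre_ guarantees it succeeds.
def filter_analysis (table_input : List (List (String × String))) (column : String) (response_to_tally : String) : List (String × Int) :=
  let major_responses : List String :=
    table_input.foldl (fun acc row => acc ++ [(row.lookup column).getD ""]) []
  let counts : Int × Int :=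
    major_responses.foldl
      (fun p response => if response == response_to_tally then (p.1 + 1, p.2) else (p.1, p.2 + 1))
      (0, 0)
  [("non comp sci major", counts.1), ("comp sci major", counts.2)]

-- ===== PORT B =====
def filter_analysis_alt (table_input : List (List (String × String))) (column : String) (response_to_tally : String) : List (String × Int) :=
  let freq : PySem.Dict String Int :=
    table_input.foldl
      (fun d row => d.modify ((row.lookup column).getD "") 0 (· + 1))
      PySem.Dict.empty
  let nMatches : Int := freq.getD response_to_tally 0
  [("non comp sci major", nMatches), ("comp sci major", (table_input.length : Int) - nMatches)]

-- ===== PRECONDITION & SPEC =====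
-- Pre_ excludes inputs where some row lacks the column: Python A raises KeyError there.
def Pre_filter_analysis (table_input : List (List (String × String))) (column : String) (response_to_tally : String) : Prop :=
  table_input.all (fun row => (row.lookup column).isSome) = true
instance (table_input : List (List (String × String))) (column : String) (response_to_tally : String) : Decidable (Pre_filter_analysis table_input column response_to_tally) := by unfold Pre_filter_analysis; infer_instance
def pvWitness_filter_analysis : (List (List (String × String))) × String × String :=
  ([[("major", "CS"), ("year", "22")], [("major", "Math")]], "major", "CS")

def Spec_filter_analysis (table_input : List (List (String × String))) (column : String) (response_to_tally : String) (out : List (String × Int)) : Prop := out = filter_analysis_alt table_input column response_to_tally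
instance (table_input : List (List (String × String))) (column : String) (response_to_tally : String) (out : List (String × Int)) : Decidable (Spec_filter_analysis table_input column response_to_tally out) := by unfold Spec_filter_analysis; infer_instance

-- ===== CLAIM =====
def Claim_equal_filter_analysis : Prop := ∀ (table_input : List (List (String × String))) (column : String) (response_to_tally : String), Dom_filter_analysis table_input column response_to_tally → Pre_filter_analysis table_input column response_to_tally → Spec_filter_analysis table_input column response_to_tally (filter_analysis table_input column response_to_tally)

-- ===== LEMMAS AND PROOFS =====

-- A's counting fold over any list of responses, from any accumulator pair.
theorem pvCountFold (xs : List String) (r : String) (a b : Int) :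
    xs.foldl (fun p response => if response == r then (p.1 + 1, p.2) else (p.1, p.2 + 1)) (a, b)
      = (a + (xs.countP (· == r) : Nat), b + ((xs.length : Int) - (xs.countP (· == r) : Nat))) := by
  induction xs generalizing a b with
  | nil => simp
  | cons x xs ih =>
    rw [List.foldl_cons, List.countP_cons]
    by_cases h : (x == r) = true <;>
      simp only [h, if_true, if_false, Bool.false_eq_true] <;>
      rw [ih] <;> simp only [Prod.ext_iff, List.length_cons] <;> push_cast <;>
      constructor <;> ring

theorem filter_analysis_spec : Claim_equal_filter_analysis := by
  intro t c r _ _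
  unfold Spec_filter_analysis filter_analysis filter_analysis_alt
  rw [PySem.List.foldl_append_singleton_eq_map]
  simp only [List.nil_append]
  rw [pvCountFold]
  -- B's frequency fold is Counter of the mapped values; its lookup is the count.
  rw [show (List.foldl (fun (d : PySem.Dict String Int) row =>
        d.modify ((List.lookup c row).getD "") 0 (· + 1)) PySem.Dict.empty t)
      = PySem.Dict.counter (t.map (fun row => (List.lookup c row).getD "")) by
        rw [PySem.Dict.counter_eq_foldl, List.foldl_map]]
  rw [PySem.Dict.getD_counter]
  simp [List.count_eq_countP]
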